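-- pv_equiv track=rewrite | github.com/rlindsberg/aoc2022 | day_1/a.py | sum_calories_for_each_elf
-- ===== SOURCE A (Python) =====
-- def sum_calories_for_each_elf(data):
--     """Each Elf is carrying some Calories separated by a blank line, and this function sums them up"""
--     calorie_dict = {}
--     input_list = data.split("\n")
--
--     sum_ = 0
--     for idx, calorie in enumerate(input_list):
--         if calorie != '':
--             sum_ += int(calorie)
--         else:
--             # finished
--             calorie_dict[idx] = sum_
--             sum_ = 0
--
--     # return sorted_calorie_dict
--     return {k: v for k, v in sorted(calorie_dict.items(), key=lambda item: item[1])}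
-- ===== SOURCE B (Python) =====
-- def sum_calories_for_each_elf(data):
--     """Each Elf is carrying some Calories separated by a blank line, and this function sums them up"""
--     input_list = data.split("\n")
--     values = [int(line) if line != '' else 0 for line in input_list]
--     blank_indices = [i for i, line in enumerate(input_list) if line == '']
--     calorie_dict = {}
--     prev = 0
--     for b in blank_indices:
--         calorie_dict[b] = sum(values[prev:b])
--         prev = b + 1
--     return dict(sorted(calorie_dict.items(), key=lambda kv: kv[1]))
-- ===== Notes on version B (the rewrite author's own statement) =====
-- stated objective: alternative
-- what changed: B replaces A's single-pass running-sum state machine (per-line accumulator flushed into the dict at each blank) by two passes: it first collects the blank-line indices, then for each blank index sums int() over the slice of lines since the previous blank.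
import Mathlib
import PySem

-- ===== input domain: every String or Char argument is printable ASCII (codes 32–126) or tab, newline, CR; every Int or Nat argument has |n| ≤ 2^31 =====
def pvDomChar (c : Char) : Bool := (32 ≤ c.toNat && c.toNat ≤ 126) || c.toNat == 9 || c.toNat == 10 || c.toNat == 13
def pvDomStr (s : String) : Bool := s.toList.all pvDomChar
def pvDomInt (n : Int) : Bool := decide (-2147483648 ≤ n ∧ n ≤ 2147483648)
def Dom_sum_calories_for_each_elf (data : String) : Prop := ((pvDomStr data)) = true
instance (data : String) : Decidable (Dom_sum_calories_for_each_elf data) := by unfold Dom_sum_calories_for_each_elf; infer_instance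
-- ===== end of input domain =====

-- B parses all lines up front, collects the blank-line indices, then sums slices of the parsed values
-- between consecutive blanks (multi-pass, no per-line state machine); objective: alternative decomposition,
-- same cost. Equivalence is about the return value only.

-- ===== PORT A =====
-- A's loop body: running sum per line, flushed into the dict at each blank line.
def pvStepA (st : PySem.Dict Int Int × Int) (p : Int × String) : PySem.Dict Int Int × Int :=
  if p.2 ≠ "" then (st.1, st.2 + (PySem.Int.ofStr? p.2).getD 0)
  else (st.1.insert p.1 st.2, 0)

def sum_calories_for_each_elf (data : String) : List (Int × Int) :=
  (PySem.Dict.ofList (PySem.List.sorted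
    (((PySem.List.enumerate ((PySem.Str.split? data "\n").getD []) 0).foldl
        pvStepA (PySem.Dict.empty, 0)).1).items
    (fun it => it.2) false)).items

-- ===== PORT B =====
-- B's per-line parse: values = [int(line) if line != '' else 0 for line in input_list]
def pvVal (line : String) : Int := if line ≠ "" then (PySem.Int.ofStr? line).getD 0 else 0

-- B's loop body: for each blank index b, record (b, sum of values[prev:b]) and set prev := b + 1.
def pvStepB (values : List Int) (st : List (Int × Int) × Int) (b : Int) : List (Int × Int) × Int :=
  (st.1 ++ [(b, (PySem.List.slice values (some st.2) (some b)).sum)], b + 1)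

def sum_calories_for_each_elf_alt (data : String) : List (Int × Int) :=
  (PySem.Dict.ofList (PySem.List.sorted
    ((((((PySem.List.enumerate ((PySem.Str.split? data "\n").getD []) 0).filter
          (fun p => p.2 == "")).map (·.1)).foldl
        (pvStepB (((PySem.Str.split? data "\n").getD []).map pvVal)) ([], 0)).1))
    (fun kv => kv.2) false)).items

-- ===== PRECONDITION & SPEC =====
-- Pre_ excludes exactly the inputs where the Python A raises ValueError: a non-blank line int() rejects.
def Pre_sum_calories_for_each_elf (data : String) : Prop :=
  (((PySem.Str.split? data "\n").getD []).all
    (fun l => l == "" || (PySem.Int.ofStr? l).isSome)) = true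
instance (data : String) : Decidable (Pre_sum_calories_for_each_elf data) := by
  unfold Pre_sum_calories_for_each_elf; infer_instance

def pvWitness_sum_calories_for_each_elf : String := "1000\n2000\n\n300\n\n4"

def Spec_sum_calories_for_each_elf (data : String) (out : List (Int × Int)) : Prop :=
  out = sum_calories_for_each_elf_alt data
instance (data : String) (out : List (Int × Int)) : Decidable (Spec_sum_calories_for_each_elf data out) := by
  unfold Spec_sum_calories_for_each_elf; infer_instance

-- ===== CLAIM (what is proved, stated in full; the proofs are below) =====
def Claim_equal_sum_calories_for_each_elf : Prop := ∀ (data : String), Dom_sum_calories_for_each_elf data → Pre_sum_calories_for_each_elf data → Spec_sum_calories_for_each_elf data (sum_calories_for_each_elf data)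

-- ===== LEMMAS AND PROOFS =====

-- the common value both loops compute: the list of (blank index, sum of the segment before it)
def pvSegs : List String → Int → Int → List (Int × Int)
  | [], _, _ => []
  | l :: rest, i, c =>
    if l ≠ "" then pvSegs rest (i + 1) (c + (PySem.Int.ofStr? l).getD 0)
    else (i, c) :: pvSegs rest (i + 1) 0

theorem pvFoldA_items : ∀ (lines : List String) (i c : Int) (d : PySem.Dict Int Int),
    (∀ k ∈ d.keys, k < i) →
    (((PySem.List.enumerate lines i).foldl pvStepA (d, c)).1).items
      = d.items ++ pvSegs lines i c := by
  intro lines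
  induction lines with
  | nil => intro i c d _; simp [PySem.List.enumerate_nil, pvSegs]
  | cons l rest ih =>
    intro i c d hk
    rw [PySem.List.enumerate_cons]
    simp only [List.foldl_cons]
    by_cases hl : l = ""
    · have hnc : d.contains i = false := by
        by_contra h
        have : d.contains i = true := by simpa using h
        have : i ∈ d.keys := (PySem.Dict.contains_iff_mem_keys d i).mp this
        exact absurd (hk i this) (by omega)
      have hstep : pvStepA (d, c) (i, l) = (d.insert i c, 0) := by
        simp [pvStepA, hl]
      rw [hstep]
      rw [ih (i + 1) 0 (d.insert i c) (by
        intro k hkmem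
        rcases (PySem.Dict.mem_keys_insert d i k c).mp hkmem with h | h
        · omega
        · have := hk k h; omega)]
      rw [PySem.Dict.items_insert_of_not_contains d c hnc]
      simp [pvSegs, hl]
    · have hstep : pvStepA (d, c) (i, l) = (d, c + (PySem.Int.ofStr? l).getD 0) := by
        simp [pvStepA, hl]
      rw [hstep, ih (i + 1) _ d (by intro k h; have := hk k h; omega)]
      simp [pvSegs, hl]

theorem pvFoldB_list : ∀ (lines : List String) (i p : Nat) (L : List String)
    (acc : List (Int × Int)), p ≤ i → L.drop i = lines →
    (((((PySem.List.enumerate lines (i : Int)).filter (fun q => q.2 == "")).map (·.1)).foldl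
        (pvStepB (L.map pvVal)) (acc, (p : Int))).1)
      = acc ++ pvSegs lines (i : Int) (((L.drop p).take (i - p)).map pvVal).sum := by
  intro lines
  induction lines with
  | nil => intro i p L acc _ _; simp [PySem.List.enumerate_nil, pvSegs]
  | cons l rest ih =>
    intro i p L acc hpi hdrop
    have hi : i < L.length := by
      by_contra h
      have : L.drop i = [] := List.drop_eq_nil_of_le (by omega)
      rw [this] at hdrop; exact List.cons_ne_nil _ _ hdrop.symm
    have hLi : L[i] = l := by
      have : L.drop i = L[i] :: L.drop (i + 1) := List.drop_eq_getElem_cons hi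
      rw [hdrop] at this; exact (List.cons.injEq _ _ _ _ ▸ this).1.symm
    have hdrop1 : L.drop (i + 1) = rest := by
      have : L.drop i = L[i] :: L.drop (i + 1) := List.drop_eq_getElem_cons hi
      rw [hdrop, hLi] at this
      exact ((List.cons.injEq _ _ _ _ ▸ this).2).symm
    rw [PySem.List.enumerate_cons]
    have hcast : (i : Int) + 1 = ((i + 1 : Nat) : Int) := by push_cast; ring
    by_cases hl : l = ""
    · simp only [List.filter_cons]
      rw [if_pos (by simp [hl])]
      simp only [List.map_cons, List.foldl_cons]
      have hstep : pvStepB (L.map pvVal) (acc, (p : Int)) (i : Int)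
          = (acc ++ [((i : Int), (((L.drop p).take (i - p)).map pvVal).sum)],
             (i : Int) + 1) := by
        simp [pvStepB, PySem.List.slice_natCast, List.map_take, List.map_drop]
      rw [hstep, hcast]
      rw [ih (i + 1) (i + 1) L _ (by omega) hdrop1]
      simp [pvSegs, hl, ← hcast]
    · simp only [List.filter_cons]
      rw [if_neg (by simp [hl])]
      rw [hcast, ih (i + 1) p L acc (by omega) hdrop1]
      have htake : (L.drop p).take (i + 1 - p) = (L.drop p).take (i - p) ++ [l] := by
        have h1 : i + 1 - p = (i - p) + 1 := by omega
        have h2 : (L.drop p)[i - p]? = some l := by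
          rw [List.getElem?_drop]
          have : p + (i - p) = i := by omega
          rw [this, List.getElem?_eq_getElem hi, hLi]
        rw [h1, List.take_add_one, h2]
        rfl
      rw [htake]
      simp [pvSegs, pvVal, hl, ← hcast]

theorem pv_core_eq (L : List String) :
    (((PySem.List.enumerate L 0).foldl pvStepA (PySem.Dict.empty, 0)).1).items
      = (((((PySem.List.enumerate L 0).filter (fun q => q.2 == "")).map (·.1)).foldl
          (pvStepB (L.map pvVal)) ([], 0)).1) := by
  have hA := pvFoldA_items L 0 0 PySem.Dict.empty (by simp [PySem.Dict.keys_empty])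
  have hB := pvFoldB_list L 0 0 L [] (by omega) (by simp)
  simp only [Nat.cast_zero] at hB
  rw [hA, hB]
  rfl

-- ===== VERDICT (by name: the statement is the Claim_ definition above) =====
theorem sum_calories_for_each_elf_spec : Claim_equal_sum_calories_for_each_elf := by
  intro data _ _
  unfold Spec_sum_calories_for_each_elf sum_calories_for_each_elf sum_calories_for_each_elf_alt
  rw [pv_core_eq ((PySem.Str.split? data "\n").getD [])]
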